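-- pv_equiv track=rewrite | github.com/prithvikunder/AES | venv/Preprocessing/grammar3.py | form_sentences
-- ===== SOURCE A (Python) =====
-- def form_sentences(pos_list):
--     temp = []
--     sentences_tags = []
--     for el in pos_list:
--         if el[0]!='.':
--             temp.append(el[1])
--         else:
--             sentences_tags.append(temp)
--             temp = []
--     return sentences_tags
-- ===== SOURCE B (Python) =====
-- def form_sentences(pos_list):
--     bounds = [-1] + [i for i, el in enumerate(pos_list) if el[0] == '.']
--     return [[el[1] for el in pos_list[bounds[k] + 1: bounds[k + 1]]]
--             for k in range(len(bounds) - 1)]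
-- ===== Notes on version B (the rewrite author's own statement) =====
-- stated objective: alternative
-- what changed: Replaced the accumulate-and-flush loop with a two-pass scheme: first collect the indices of the period delimiters (prefixed with -1), then emit each sentence by slicing between consecutive delimiter indices; the tail after the last period is dropped because it has no closing bound.
import Mathlib
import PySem

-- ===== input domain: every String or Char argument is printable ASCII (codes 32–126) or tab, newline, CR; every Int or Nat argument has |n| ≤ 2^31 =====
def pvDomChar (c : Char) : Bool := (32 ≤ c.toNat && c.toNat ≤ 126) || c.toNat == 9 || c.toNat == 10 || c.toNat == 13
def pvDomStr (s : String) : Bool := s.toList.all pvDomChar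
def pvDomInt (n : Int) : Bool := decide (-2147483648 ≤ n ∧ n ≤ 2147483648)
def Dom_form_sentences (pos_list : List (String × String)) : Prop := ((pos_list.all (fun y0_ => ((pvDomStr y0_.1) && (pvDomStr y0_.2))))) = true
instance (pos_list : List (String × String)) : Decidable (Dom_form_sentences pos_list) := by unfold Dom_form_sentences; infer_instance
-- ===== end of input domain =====

-- B replaces A's accumulate-and-flush loop by a delimiter-index pass followed by slicing between
-- consecutive delimiters (objective: alternative decomposition, same cost).

-- ===== PORT A =====
def form_sentences (pos_list : List (String × String)) : List (List String) :=
  (pos_list.foldl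
    (fun (st : List String × List (List String)) el =>
      if el.1 ≠ "." then (st.1 ++ [el.2], st.2)
      else ([], st.2 ++ [st.1]))
    ([], [])).2

-- ===== PORT B =====
def form_sentences_alt (pos_list : List (String × String)) : List (List String) :=
  let bounds : List Int :=
    [-1] ++ ((PySem.List.enumerate pos_list).filter (fun p => p.2.1 == ".")).map (fun p => p.1)
  (PySem.List.pyRange 0 ((bounds.length : Int) - 1) 1).map (fun k =>
    (PySem.List.slice pos_list (some (PySem.List.pyGetD bounds k 0 + 1))
        (some (PySem.List.pyGetD bounds (k + 1) 0))).map (fun el => el.2))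

-- ===== PRECONDITION & SPEC =====
def Spec_form_sentences (pos_list : List (String × String)) (out : List (List String)) : Prop := out = form_sentences_alt pos_list
instance (pos_list : List (String × String)) (out : List (List String)) : Decidable (Spec_form_sentences pos_list out) := by unfold Spec_form_sentences; infer_instance

-- ===== CLAIM (what is proved, stated in full; the proofs are below) =====
def Claim_equal_form_sentences : Prop := ∀ (pos_list : List (String × String)), Dom_form_sentences pos_list → Spec_form_sentences pos_list (form_sentences pos_list)

-- ===== LEMMAS AND PROOFS =====

-- A's loop as a structural recursion: (remaining accumulator, flushed sentences).
def aA (temp : List String) : List (String × String) → List String × List (List String)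
  | [] => (temp, [])
  | e :: l =>
    if e.1 ≠ "." then aA (temp ++ [e.2]) l
    else ((aA [] l).1, temp :: (aA [] l).2)

lemma foldA (l : List (String × String)) :
    ∀ (temp : List String) (sents : List (List String)),
      l.foldl
        (fun (st : List String × List (List String)) el =>
          if el.1 ≠ "." then (st.1 ++ [el.2], st.2)
          else ([], st.2 ++ [st.1])) (temp, sents)
      = ((aA temp l).1, sents ++ (aA temp l).2) := by
  induction l with
  | nil => intro temp sents; simp [aA]
  | cons e l ih =>
    intro temp sents
    by_cases h : e.1 = "."
    · rw [List.foldl_cons, if_neg (show ¬ (e.1 ≠ ".") from by simp [h]), ih]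
      simp [aA, h]
    · rw [List.foldl_cons, if_pos h, ih]
      simp [aA, h]

lemma aA_temp (l : List (String × String)) :
    ∀ temp, (aA temp l).2 =
      match (aA [] l).2 with
      | [] => []
      | h :: t => (temp ++ h) :: t := by
  induction l with
  | nil => intro temp; simp [aA]
  | cons e l ih =>
    intro temp
    by_cases h : e.1 = "."
    · simp [aA, h]
    · have ha : (aA temp (e :: l)).2 = (aA (temp ++ [e.2]) l).2 := by simp [aA, h]
      have hb : (aA [] (e :: l)).2 = (aA [e.2] l).2 := by simp [aA, h]
      rw [ha, hb, ih (temp ++ [e.2]), ih [e.2]]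
      rcases (aA [] l).2 with _ | ⟨h0, t0⟩ <;> simp

-- B's delimiter indices, as natural numbers.
def bN : List (String × String) → List Nat
  | [] => []
  | e :: l => if e.1 = "." then 0 :: (bN l).map (· + 1) else (bN l).map (· + 1)

lemma enum_filter (l : List (String × String)) :
    ∀ s : Int,
      (((PySem.List.enumerate l s).filter (fun p => p.2.1 == ".")).map (fun p => p.1))
        = (bN l).map (fun n : Nat => s + (n : Int)) := by
  induction l with
  | nil => intro s; simp [PySem.List.enumerate_nil, bN]
  | cons e l ih =>
    intro s
    rw [PySem.List.enumerate_cons, List.filter_cons]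
    by_cases h : e.1 = "."
    · rw [if_pos (by simp [h]), List.map_cons, ih (s + 1)]
      simp only [bN, if_pos h, List.map_cons, List.map_map]
      congr 1
      · norm_num
      · refine List.map_congr_left ?_
        intro n _
        simp only [Function.comp_apply]
        push_cast
        ring
    · rw [if_neg (by simp [h]), ih (s + 1)]
      simp only [bN, if_neg h, List.map_map]
      refine List.map_congr_left ?_
      intro n _
      simp only [Function.comp_apply]
      push_cast
      ring

-- B's slicing pass as a recursion over consecutive bound pairs.
def segs (l : List (String × String)) : List Int → List (List String)
  | a :: b :: rest =>
      (PySem.List.slice l (some (a + 1)) (some b)).map (fun el => el.2) :: segs l (b :: rest)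
  | _ => []

lemma range_pairs (l : List (String × String)) (bs : List Int) :
    (PySem.List.pyRange 0 ((bs.length : Int) - 1) 1).map (fun k =>
      (PySem.List.slice l (some (PySem.List.pyGetD bs k 0 + 1))
          (some (PySem.List.pyGetD bs (k + 1) 0))).map (fun el => el.2))
    = segs l bs := by
  have key : ∀ bs : List Int,
      (List.range (bs.length - 1)).map (fun j =>
        (PySem.List.slice l (some (bs.getD j 0 + 1)) (some (bs.getD (j + 1) 0))).map
          (fun el => el.2)) = segs l bs := by
    intro bs
    induction bs with
    | nil => simp [segs]
    | cons a tl ih =>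
      cases tl with
      | nil => simp [segs]
      | cons b rest =>
        simp only [List.length_cons, Nat.add_sub_cancel, List.range_succ_eq_map,
          List.map_cons, List.map_map]
        rw [segs]
        refine congrArg₂ List.cons ?_ ?_
        · rfl
        · rw [← ih]
          simp only [List.length_cons, Nat.add_sub_cancel]
          refine List.map_congr_left ?_
          intro j _
          simp [Function.comp, List.getD]
  rw [PySem.List.pyRange_one,
    show (((bs.length : Int)) - 1 - 0).toNat = bs.length - 1 from by omega,
    List.map_map, ← key bs]
  refine List.map_congr_left ?_
  intro j hj
  simp only [Function.comp_apply]
  rw [show (0 : Int) + (j : Int) = ((j : Nat) : Int) from by omega,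
    PySem.List.pyGetD_natCast,
    show ((j : Nat) : Int) + 1 = (((j + 1 : Nat)) : Int) from by push_cast; ring,
    PySem.List.pyGetD_natCast]

lemma segs_shift (e : String × String) (l : List (String × String)) :
    ∀ (bs : List Nat) (a : Int), -1 ≤ a →
      segs (e :: l) ((a + 1) :: bs.map (fun n : Nat => (n : Int) + 1))
        = segs l (a :: bs.map (fun n : Nat => (n : Int))) := by
  intro bs
  induction bs with
  | nil => intro a ha; simp [segs]
  | cons b rest ih =>
    intro a ha
    simp only [List.map_cons]
    rw [segs, segs]
    congr 1
    · -- head slice shifts down one position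
      obtain ⟨m, hm⟩ : ∃ m : Nat, a + 1 = (m : Int) := ⟨(a + 1).toNat, by omega⟩
      rw [hm, show ((m : Nat) : Int) + 1 = ((m + 1 : Nat) : Int) from by omega,
        show ((b : Nat) : Int) + 1 = ((b + 1 : Nat) : Int) from by omega,
        PySem.List.slice_natCast, PySem.List.slice_natCast]
      simp [Nat.add_sub_add_right]
    · exact ih (b : Int) (by omega)

lemma main_core (l : List (String × String)) :
    segs l (-1 :: (bN l).map (fun n : Nat => (n : Int))) = (aA [] l).2 := by
  induction l with
  | nil => simp [bN, segs, aA]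
  | cons e l ih =>
    have hcomp : ((fun n : Nat => (n : Int)) ∘ (fun x : Nat => x + 1))
        = (fun n : Nat => (n : Int) + 1) := by
      funext n; simp only [Function.comp_apply]; omega
    by_cases h : e.1 = "."
    · -- delimiter: an empty sentence is flushed
      simp only [bN, if_pos h, List.map_cons, List.map_map, hcomp]
      rw [segs]
      have h0 : PySem.List.slice (e :: l) (some (-1 + 1)) (some ((0 : Nat) : Int)) = [] := by
        rw [show (-1 + 1 : Int) = ((0 : Nat) : Int) from by norm_num, PySem.List.slice_natCast]
        simp
      rw [h0]
      have hs := segs_shift e l (bN l) (-1) (by norm_num)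
      norm_num at hs
      norm_num
      rw [hs, ih]
      simp [aA, h]
    · -- ordinary tag: it is prepended to the first sentence, if any
      have hbn : bN (e :: l) = (bN l).map (· + 1) := by simp [bN, h]
      have hb2 : (aA [] (e :: l)).2 = (aA [e.2] l).2 := by simp [aA, h]
      rw [hbn]
      rcases hb : bN l with _ | ⟨b, rest⟩
      · have hnil : (aA [] l).2 = [] := by rw [← ih, hb]; simp [segs]
        rw [hb2, aA_temp l [e.2], hnil]
        simp [segs]
      · simp only [List.map_cons, List.map_map, hcomp]
        rw [segs]
        push_cast
        have hs := segs_shift e l rest (b : Int) (by omega)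
        rw [hs]
        have hih : (PySem.List.slice l (some (-1 + 1)) (some (b : Int))).map (fun el => el.2)
            :: segs l ((b : Int) :: rest.map (fun n : Nat => (n : Int))) = (aA [] l).2 := by
          rw [← ih, hb]; simp only [List.map_cons]; rw [segs]
        have hhead : (PySem.List.slice (e :: l) (some (0 : Int)) (some ((b : Int) + 1))).map
              (fun el => el.2)
            = e.2 :: (PySem.List.slice l (some (-1 + 1)) (some (b : Int))).map (fun el => el.2) := by
          conv_rhs => rw [show (-1 + 1 : Int) = ((0 : Nat) : Int) from by norm_num]
          rw [show (0 : Int) = ((0 : Nat) : Int) from rfl,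
            show ((b : Nat) : Int) + 1 = ((b + 1 : Nat) : Int) from by omega,
            PySem.List.slice_natCast, PySem.List.slice_natCast]
          simp
        rw [hb2, aA_temp l [e.2], ← hih]
        simp only []
        rw [hhead]
        simp

theorem form_sentences_spec : Claim_equal_form_sentences := by
  intro l _
  unfold Spec_form_sentences form_sentences form_sentences_alt
  rw [foldA l [] []]
  simp only [List.nil_append]
  rw [enum_filter l 0]
  have : (bN l).map (fun n : Nat => (0 : Int) + (n : Int)) = (bN l).map (fun n : Nat => (n : Int)) := by
    refine List.map_congr_left ?_; intro n _; ring
  rw [this]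
  rw [show ([-1] ++ (bN l).map (fun n : Nat => (n : Int))) = (-1 :: (bN l).map (fun n : Nat => (n : Int))) from rfl]
  rw [range_pairs l (-1 :: (bN l).map (fun n : Nat => (n : Int))), main_core]
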